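-- pv_equiv track=rewrite | github.com/VyUng0711/competitive-programming-solutions | codeforces/476B.py | get_finish_position
-- ===== SOURCE A (Python) =====
-- def get_finish_position(s):
--   start = 0
--   for i in s:
--     if i == "+":
--       start += 1
--     elif i == "-":
--       start -= 1
--   return start
-- ===== SOURCE B (Python) =====
-- def get_finish_position(s):
--   return s.count("+") - s.count("-")
-- ===== Notes on version B (the rewrite author's own statement) =====
-- stated objective: simpler
-- what changed: Replaces the character-by-character accumulator loop with a single expression: the difference of two library substring counts of the plus and minus symbols.
import Mathlib
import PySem

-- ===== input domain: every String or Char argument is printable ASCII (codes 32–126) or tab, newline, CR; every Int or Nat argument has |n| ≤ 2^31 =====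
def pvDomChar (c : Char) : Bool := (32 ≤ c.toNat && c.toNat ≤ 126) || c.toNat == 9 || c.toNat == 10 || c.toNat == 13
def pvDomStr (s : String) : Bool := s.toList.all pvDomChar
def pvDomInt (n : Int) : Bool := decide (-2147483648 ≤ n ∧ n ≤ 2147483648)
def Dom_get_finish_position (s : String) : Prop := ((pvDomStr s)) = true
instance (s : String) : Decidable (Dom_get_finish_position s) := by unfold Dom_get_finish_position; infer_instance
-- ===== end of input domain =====

-- B replaces A's fused accumulator loop by the difference of two library substring counts (simpler).

-- ===== PORT A =====
def get_finish_position (s : String) : Int :=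
  s.toList.foldl (fun start i =>
    if i == '+' then start + 1
    else if i == '-' then start - 1
    else start) 0

-- ===== PORT B =====
def get_finish_position_alt (s : String) : Int :=
  (PySem.Str.count s "+" : Int) - (PySem.Str.count s "-" : Int)

-- ===== PRECONDITION & SPEC =====
def Spec_get_finish_position (s : String) (out : Int) : Prop := out = get_finish_position_alt s
instance (s : String) (out : Int) : Decidable (Spec_get_finish_position s out) := by unfold Spec_get_finish_position; infer_instance

-- ===== CLAIM (what is proved, stated in full; the proofs are below) =====
def Claim_equal_get_finish_position : Prop := ∀ (s : String), Dom_get_finish_position s → Spec_get_finish_position s (get_finish_position s)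

-- ===== LEMMAS AND PROOFS =====

-- Chars.count.go with a one-character needle and enough fuel counts occurrences of that character.
theorem count_go_singleton (c : Char) (l : List Char) (fuel acc : Nat)
    (h : l.length ≤ fuel) :
    PySem.Chars.count.go [c] fuel l acc = acc + l.count c := by
  induction l generalizing fuel acc with
  | nil => cases fuel <;> simp [PySem.Chars.count.go]
  | cons x t ih =>
    cases fuel with
    | zero => simp at h
    | succ n =>
      simp only [List.length_cons, Nat.succ_le_succ_iff] at h
      by_cases hx : x = c
      · subst hx
        simp [PySem.Chars.count.go, List.isPrefixOf, ih n (acc + 1) h,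
          List.count_cons_self]
        omega
      · have : ([c].isPrefixOf (x :: t)) = false := by
          simp [List.isPrefixOf]
          intro hc; exact absurd hc.symm hx
        simp [PySem.Chars.count.go, this, ih n acc h, List.count_cons_of_ne hx]

-- Python s.count(ch) for a single character is the list count of that character.
theorem chars_count_singleton (cs : List Char) (c : Char) :
    PySem.Chars.count cs [c] = cs.count c := by
  simp [PySem.Chars.count, count_go_singleton c cs cs.length 0 (le_refl _)]

-- A's loop computes count '+' minus count '-', by induction with the accumulator generalized.
theorem foldl_pm (l : List Char) (a : Int) :
    l.foldl (fun start i =>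
      if i == '+' then start + 1
      else if i == '-' then start - 1
      else start) a = a + (l.count '+' : Int) - (l.count '-' : Int) := by
  induction l generalizing a with
  | nil => simp
  | cons x t ih =>
    rw [List.foldl_cons]
    by_cases h1 : x = '+'
    · subst h1
      show List.foldl _ (a + 1) t = _
      rw [ih, List.count_cons_self,
        List.count_cons_of_ne (by decide : ('+' : Char) ≠ '-')]
      push_cast; ring
    · by_cases h2 : x = '-'
      · subst h2
        show List.foldl _ (if ('-' : Char) == '+' then a + 1 else a - 1) t = _
        rw [show (('-' : Char) == '+') = false from rfl]
        show List.foldl _ (a - 1) t = _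
        rw [ih, List.count_cons_self, List.count_cons_of_ne h1]
        push_cast; ring
      · rw [show ((x == '+') : Bool) = false from beq_eq_false_iff_ne.mpr h1,
          show ((x == '-') : Bool) = false from beq_eq_false_iff_ne.mpr h2]
        show List.foldl _ a t = _
        rw [ih, List.count_cons_of_ne h1, List.count_cons_of_ne h2]

-- ===== VERDICT (by name: the statement is the Claim_ definition above) =====
theorem get_finish_position_spec : Claim_equal_get_finish_position := by
  intro s _
  unfold Spec_get_finish_position get_finish_position get_finish_position_alt
  rw [PySem.Str.count_eq, PySem.Str.count_eq,
    show ("+" : String).toList = ['+'] from rfl,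
    show ("-" : String).toList = ['-'] from rfl,
    chars_count_singleton, chars_count_singleton, foldl_pm]
  ring
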